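-- pv_equiv track=rewrite | github.com/MIYUYUYU/ejudge25 | 9-1027/27.SpiralString.py | order_str
-- ===== SOURCE A (Python) =====
-- from collections import OrderedDict
--
-- def order_str(s):
--     odr_s = OrderedDict()
--     for char in s:
--         if char not in odr_s:
--             odr_s[char] = 1
--         else:
--             odr_s[char] += 1
--     out_s = []
--     for key, value in odr_s.items():
--         out_s.append(str(key)*value)
--     result = ''.join(out_s)
--     return result
-- ===== SOURCE B (Python) =====
-- def order_str(s):
--     return ''.join(sorted(s, key=s.find))
-- ===== Notes on version B (the rewrite author's own statement) =====
-- stated objective: idiomatic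
-- what changed: Replaces A's single-pass OrderedDict tally-and-rebuild with a one-liner that stably sorts the string's characters by the index of their first occurrence (key=s.find): no counting at all, the stable sort groups equal characters in first-appearance order.
import Mathlib
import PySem

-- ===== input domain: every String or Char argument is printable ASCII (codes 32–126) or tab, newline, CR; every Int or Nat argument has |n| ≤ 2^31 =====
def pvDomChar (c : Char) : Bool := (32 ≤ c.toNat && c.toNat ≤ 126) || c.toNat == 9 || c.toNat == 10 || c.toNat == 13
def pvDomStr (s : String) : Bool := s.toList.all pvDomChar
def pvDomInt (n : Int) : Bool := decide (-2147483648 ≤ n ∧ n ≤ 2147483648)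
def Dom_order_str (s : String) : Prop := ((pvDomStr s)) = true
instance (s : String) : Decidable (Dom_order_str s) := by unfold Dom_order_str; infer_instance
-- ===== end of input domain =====

-- B replaces A's single-pass OrderedDict tally-and-rebuild with a one-liner that stably
-- sorts the characters by the index of their first occurrence ('idiomatic'; not faster).

-- ===== PORT A =====
def order_str (s : String) : String :=
  let odr := s.toList.foldl
    (fun (d : PySem.Dict Char Int) c =>
      if d.contains c = false then d.insert c 1 else d.insert c (d.getD c 0 + 1))
    PySem.Dict.empty
  let out := odr.items.foldl
    (fun (acc : List (List Char)) kv => acc ++ [PySem.List.pyRepeat [kv.1] kv.2]) []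
  String.ofList (PySem.Chars.join [] out)

-- ===== PORT B =====
def order_str_alt (s : String) : String :=
  String.ofList (PySem.Chars.join []
    ((PySem.List.sorted s.toList (fun c => PySem.Str.find s (String.ofList [c]))).map (fun c => [c])))

-- ===== PRECONDITION & SPEC =====
def Spec_order_str (s : String) (out : String) : Prop := out = order_str_alt s
instance (s : String) (out : String) : Decidable (Spec_order_str s out) := by unfold Spec_order_str; infer_instance

-- ===== CLAIM (what is proved, stated in full; the proofs are below) =====
def Claim_equal_order_str : Prop := ∀ (s : String), Dom_order_str s → Spec_order_str s (order_str s)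

-- ===== LEMMAS AND PROOFS =====

-- A's branching dict update is exactly the counter update (a missing key reads as 0).
theorem pv_fold_eq_counter (cs : List Char) :
    cs.foldl
      (fun (d : PySem.Dict Char Int) c =>
        if d.contains c = false then d.insert c 1 else d.insert c (d.getD c 0 + 1))
      PySem.Dict.empty = PySem.Dict.counter cs := by
  rw [show (fun (d : PySem.Dict Char Int) c =>
        if d.contains c = false then d.insert c 1 else d.insert c (d.getD c 0 + 1))
      = (fun (d : PySem.Dict Char Int) c => d.insert c (d.getD c 0 + 1)) from ?_]
  · exact PySem.Dict.foldl_insert_getD_add_one_eq_counter cs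
  · funext d c
    by_cases h : d.contains c = false
    · simp [h, PySem.Dict.getD_of_not_contains d 0 h]
    · simp [h]

-- ''.join of a list of pieces is their concatenation.
theorem pv_join_nil_flatten (L : List (List Char)) : PySem.Chars.join [] L = L.flatten := by
  induction L with
  | nil => rfl
  | cons l L ih =>
    cases L with
    | nil => simp [PySem.Chars.join, List.intercalate]
    | cons m M =>
      have := ih
      simp [PySem.Chars.join, List.intercalate] at this ⊢
      simpa using this

-- s.find(c) for a character c occurring in s is the index of its first occurrence.
theorem pv_find_go_singleton (c : Char) : ∀ (cs : List Char) (k : Nat), c ∈ cs →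
    PySem.Chars.find.go [c] cs k = ((k : Int) + (cs.idxOf c : Int)) := by
  intro cs
  induction cs with
  | nil => intro k h; cases h
  | cons x t ih =>
    intro k h
    rw [PySem.Chars.find.go]
    by_cases hx : c = x
    · subst hx
      simp [List.isPrefixOf]
    · have hp : ([c].isPrefixOf (x :: t)) = false := by
        simp only [List.isPrefixOf, Bool.and_eq_false_iff, beq_eq_false_iff_ne]
        exact Or.inl hx
      have hmem : c ∈ t := by cases h with | head => exact absurd rfl hx | tail _ h => exact h
      rw [hp]
      simp only [Bool.false_eq_true, if_false]
      rw [ih (k + 1) hmem]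
      have hxc : (x == c) = false := by
        simp only [beq_eq_false_iff_ne]; exact fun e => hx e.symm
      simp [List.idxOf_cons, hxc]
      ring

theorem pv_find_singleton (cs : List Char) (c : Char) (h : c ∈ cs) :
    PySem.Chars.find cs [c] = (cs.idxOf c : Int) := by
  simpa using pv_find_go_singleton c cs 0 h

-- The distinct characters, in first-appearance order, have strictly increasing first indices.
theorem pv_dedup_idxOf_pairwise : ∀ (cs : List Char),
    (PySem.Set.ofList cs).Pairwise (fun a b => cs.idxOf a < cs.idxOf b) := by
  intro cs
  induction cs with
  | nil => simp [PySem.Set.ofList]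
  | cons x t ih =>
    rw [PySem.Set.ofList_cons]
    constructor
    · intro b hb
      obtain ⟨hbt, hbx⟩ := (PySem.Set.mem_discard _ x b).mp hb
      have hxb : (x == b) = false := by simp; exact fun e => absurd e.symm hbx
      simp [List.idxOf_cons, hxb]
    · have h1 : ((PySem.Set.ofList t).discard x).Pairwise (fun a b => t.idxOf a < t.idxOf b) :=
        List.Pairwise.filter _ ih
      refine h1.imp_of_mem ?_
      intro a b ha hb hrel
      obtain ⟨_, hax⟩ := (PySem.Set.mem_discard _ x a).mp ha
      obtain ⟨_, hbx⟩ := (PySem.Set.mem_discard _ x b).mp hb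
      have hxa : (x == a) = false := by simp; exact fun e => absurd e.symm hax
      have hxb : (x == b) = false := by simp; exact fun e => absurd e.symm hbx
      simp [List.idxOf_cons, hxa, hxb]
      omega

-- A nondecreasingly key-ordered list is determined by its multiset when equal keys force equal elements.
theorem pv_sorted_unique {α : Type} (key : α → Int) : ∀ (ys zs : List α), ys.Perm zs →
    ys.Pairwise (fun a b => key a ≤ key b) → zs.Pairwise (fun a b => key a ≤ key b) →
    (∀ a ∈ ys, ∀ b ∈ ys, key a = key b → a = b) → ys = zs := by
  intro ys
  induction ys with
  | nil => intro zs hp _ _ _; simpa using hp.symm.eq_nil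
  | cons a ys' ih =>
    intro zs hp hy hz hinj
    cases zs with
    | nil => exact absurd hp.symm (by simp)
    | cons b zs' =>
      have hab : a = b := by
        have hbmem : b ∈ a :: ys' := hp.symm.subset (List.mem_cons_self)
        have hamem : a ∈ b :: zs' := hp.subset (List.mem_cons_self)
        have h1 : key a ≤ key b := by
          cases hbmem with
          | head => exact le_refl _
          | tail _ h => exact (List.pairwise_cons.mp hy).1 b h
        have h2 : key b ≤ key a := by
          cases hamem with
          | head => exact le_refl _
          | tail _ h => exact (List.pairwise_cons.mp hz).1 a h
        exact hinj a List.mem_cons_self b hbmem (le_antisymm h1 h2)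
      subst hab
      have htail : ys' = zs' := by
        refine ih zs' hp.cons_inv (List.pairwise_cons.mp hy).2 (List.pairwise_cons.mp hz).2 ?_
        intro x hx y hy' he
        exact hinj x (List.mem_cons_of_mem _ hx) y (List.mem_cons_of_mem _ hy') he
      rw [htail]

-- Each character occurs in A's grouped output exactly as often as in s.
theorem pv_count_blocks (cs : List Char) (v : Char) :
    (((PySem.Set.ofList cs).map (fun k => List.replicate (cs.count k) k)).flatten).count v
      = cs.count v := by
  rw [List.count_flatten, List.map_map]
  have key : ∀ (l : List Char), l.Nodup →
      (l.map (fun k => List.count v (List.replicate (cs.count k) k))).sum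
        = if v ∈ l then cs.count v else 0 := by
    intro l
    induction l with
    | nil => simp
    | cons x t ih =>
      intro hn
      simp only [List.map_cons, List.sum_cons, ih hn.of_cons]
      by_cases hvx : v = x
      · subst hvx
        have hvt : v ∉ t := (List.nodup_cons.mp hn).1
        simp [hvt]
      · have hxv : (x == v) = false := by simp; exact fun e => absurd e.symm hvx
        simp [List.count_replicate, hxv, hvx]
  simp only [Function.comp_def]
  rw [key _ (PySem.Set.nodup_ofList cs)]
  by_cases hv : v ∈ cs
  · simp [PySem.Set.mem_ofList, hv]
  · simp [PySem.Set.mem_ofList, hv, List.count_eq_zero.mpr hv]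

-- ===== VERDICT (by name: the statement is the Claim_ definition above) =====
theorem order_str_spec : Claim_equal_order_str := by
  intro s _
  unfold Spec_order_str order_str order_str_alt
  simp only []
  rw [pv_fold_eq_counter, PySem.Dict.items_counter,
      PySem.List.foldl_append_singleton_eq_map, List.nil_append, List.map_map]
  rw [pv_join_nil_flatten, PySem.Chars.join_nil_singletons]
  have hrep : ((fun kv : Char × Int => PySem.List.pyRepeat [kv.1] kv.2) ∘
        (fun k => (k, (List.count k s.toList : Int))))
      = fun k => List.replicate (s.toList.count k) k := by
    funext k
    simp [Function.comp, PySem.List.pyRepeat_singleton]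
  rw [hrep]
  -- both sides: the grouped blocks and the stable sort by first index
  set cs := s.toList with hcs
  set key : Char → Int := fun c => PySem.Str.find s (String.ofList [c]) with hkey
  have hkeymem : ∀ c ∈ cs, key c = (cs.idxOf c : Int) := by
    intro c hc
    rw [hkey]
    simp only [PySem.Str.find_eq]
    have : (String.ofList [c]).toList = [c] := by simp
    rw [this, ← hcs, pv_find_singleton cs c hc]
  have hmemblocks : ∀ x ∈ ((PySem.Set.ofList cs).map
      (fun k => List.replicate (cs.count k) k)).flatten, x ∈ cs := by
    intro x hx
    obtain ⟨l, hl, hxl⟩ := List.mem_flatten.mp hx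
    obtain ⟨k, hk, rfl⟩ := List.mem_map.mp hl
    rw [List.eq_of_mem_replicate hxl]
    exact (PySem.Set.mem_ofList _ _).mp hk
  refine congrArg String.ofList (pv_sorted_unique key _ _ ?_ ?_ ?_ ?_)
  · -- perm: same character counts
    refine (List.perm_iff_count).mpr ?_
    intro v
    rw [pv_count_blocks]
    exact ((PySem.List.sorted_perm cs key false).count_eq v).symm
  · -- blocks are nondecreasing in key
    rw [List.pairwise_flatten]
    constructor
    · intro l hl
      obtain ⟨k, hk, rfl⟩ := List.mem_map.mp hl
      exact List.pairwise_replicate.mpr (Or.inr (le_refl _))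
    · rw [List.pairwise_map]
      refine (pv_dedup_idxOf_pairwise cs).imp_of_mem ?_
      intro a b ha hb hrel x hx y hy
      rw [List.eq_of_mem_replicate hx, List.eq_of_mem_replicate hy,
          hkeymem a ((PySem.Set.mem_ofList _ _).mp ha),
          hkeymem b ((PySem.Set.mem_ofList _ _).mp hb)]
      exact_mod_cast le_of_lt hrel
  · exact PySem.List.sorted_pairwise cs key
  · -- equal keys force equal characters
    intro a ha b hb he
    have ha' := hmemblocks a ha
    have hb' := hmemblocks b hb
    rw [hkeymem a ha', hkeymem b hb'] at he
    have hidx : cs.idxOf a = cs.idxOf b := by exact_mod_cast he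
    have h1 : cs[cs.idxOf a]'(List.idxOf_lt_length_of_mem ha') = a := List.getElem_idxOf _
    have h2 : cs[cs.idxOf b]'(List.idxOf_lt_length_of_mem hb') = b := List.getElem_idxOf _
    rw [← h1, ← h2]
    congr 1
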